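-- pv_equiv track=rewrite | github.com/acmfi/AdventCode | 2021/day04/jasviers/main.py | mgenerator
-- ===== SOURCE A (Python) =====
-- def mgenerator(data):
--     matrix, newM = [], []
--     for line in data:
--         if line == "":
--             matrix.append(newM)
--             newM = []
--         else:
--             newM.append(list(map(int, line.split())))
--     return matrix
-- ===== SOURCE B (Python) =====
-- def mgenerator(data):
--     rows = [None if l == "" else [int(t) for t in l.split()] for l in data]
--     boards = []
--     while None in rows:
--         i = rows.index(None)
--         boards.append(rows[:i])
--         rows = rows[i + 1:]
--     return boards
-- ===== Notes on version B (the rewrite author's own statement) =====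
-- stated objective: alternative
-- what changed: B replaces A's streaming row-accumulator (append rows until a blank, flush each board on its blank) by a two-phase chunk splitter: first map every line to a parsed row (None marking blanks), then repeatedly find the next None with list.index and slice one whole board off the front.
import Mathlib
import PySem

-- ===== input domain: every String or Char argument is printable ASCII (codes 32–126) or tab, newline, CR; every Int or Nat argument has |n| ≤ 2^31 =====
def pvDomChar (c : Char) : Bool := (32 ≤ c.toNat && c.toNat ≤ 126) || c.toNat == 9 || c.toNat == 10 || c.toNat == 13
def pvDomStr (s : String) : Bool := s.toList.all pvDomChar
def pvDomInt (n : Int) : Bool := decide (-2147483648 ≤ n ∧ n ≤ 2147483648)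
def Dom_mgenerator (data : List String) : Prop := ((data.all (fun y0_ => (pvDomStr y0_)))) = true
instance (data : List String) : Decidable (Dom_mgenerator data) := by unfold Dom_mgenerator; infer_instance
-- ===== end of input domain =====

-- B parses blank-separated chunks by repeated index-of-blank + slice instead of A's streaming accumulator (alternative decomposition, same asymptotic cost).


-- shared by both ports: list(map(int, line.split())); Pre_ guarantees every ofStr? is some, so getD 0 is never taken
def pvParseLine (l : String) : List Int :=
  (PySem.Str.split₀ l).map (fun t => (PySem.Int.ofStr? t).getD 0)

-- ===== PORT A =====
def mgenerator (data : List String) : List (List (List Int)) :=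
  (data.foldl
    (fun (st : List (List (List Int)) × List (List Int)) line =>
      if line == "" then (st.1 ++ [st.2], []) else (st.1, st.2 ++ [pvParseLine line]))
    ([], [])).1

-- ===== PORT B =====
-- rows = [None if l == "" else parsed row for l in data]
def pvRow (l : String) : Option (List Int) :=
  if l == "" then none else some (pvParseLine l)

-- while None in rows: i = rows.index(None); emit rows[:i]; rows = rows[i+1:]
-- (nonnegative slices rows[:i] / rows[i+1:] ported as take/drop; every entry of rows[:i]
--  is non-None, so 'filterMap id' is exactly the Python list rows[:i] under the Option typing)
def mgeneratorAltGo (rows : List (Option (List Int))) : List (List (List Int)) :=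
  if h : (none : Option (List Int)) ∈ rows then
    ((rows.take (rows.idxOf none)).filterMap id) ::
      mgeneratorAltGo (rows.drop (rows.idxOf none + 1))
  else []
termination_by rows.length
decreasing_by
  have hne : rows ≠ [] := List.ne_nil_of_mem h
  have hpos : 0 < rows.length := List.length_pos_iff.mpr hne
  simp only [List.length_drop]
  omega

def mgenerator_alt (data : List String) : List (List (List Int)) :=
  mgeneratorAltGo (data.map pvRow)

-- ===== PRECONDITION & SPEC =====
-- Pre_ excludes exactly the inputs where Python A raises ValueError: some non-blank line has a token int() rejects.
def pvLineOk (l : String) : Bool :=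
  l == "" || (PySem.Str.split₀ l).all (fun t => (PySem.Int.ofStr? t).isSome)

def Pre_mgenerator (data : List String) : Prop := data.all pvLineOk = true
instance (data : List String) : Decidable (Pre_mgenerator data) := by unfold Pre_mgenerator; infer_instance

def pvWitness_mgenerator : List String := ["22 13", "+5 1_000", "", " 7 ", ""]

def Spec_mgenerator (data : List String) (out : List (List (List Int))) : Prop := out = mgenerator_alt data
instance (data : List String) (out : List (List (List Int))) : Decidable (Spec_mgenerator data out) := by unfold Spec_mgenerator; infer_instance

-- ===== CLAIM (what is proved, stated in full; the proofs are below) =====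
def Claim_equal_mgenerator : Prop := ∀ (data : List String), Dom_mgenerator data → Pre_mgenerator data → Spec_mgenerator data (mgenerator data)

-- ===== LEMMAS AND PROOFS =====

theorem altGo_unfold (rows : List (Option (List Int))) :
    mgeneratorAltGo rows =
      (if (none : Option (List Int)) ∈ rows then
        ((rows.take (rows.idxOf none)).filterMap id) ::
          mgeneratorAltGo (rows.drop (rows.idxOf none + 1))
      else []) := by
  rw [mgeneratorAltGo.eq_def]
  by_cases h : (none : Option (List Int)) ∈ rows <;> simp [h]

-- A's loop as a structural recursion on the remaining lines, with the current board as state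
def pvGo (cur : List (List Int)) : List String → List (List (List Int))
  | [] => []
  | l :: rest => if l = "" then cur :: pvGo [] rest else pvGo (cur ++ [pvParseLine l]) rest

theorem pvFoldA (data : List String) :
    ∀ (m : List (List (List Int))) (cur : List (List Int)),
      (data.foldl
        (fun (st : List (List (List Int)) × List (List Int)) line =>
          if line == "" then (st.1 ++ [st.2], []) else (st.1, st.2 ++ [pvParseLine line]))
        (m, cur)).1 = m ++ pvGo cur data := by
  induction data with
  | nil => intro m cur; simp [pvGo]
  | cons l rest ih =>
    intro m cur
    simp only [List.foldl_cons]
    by_cases h : (l == "") = true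
    · rw [if_pos h, ih]
      have h' : l = "" := by simpa using h
      subst h'
      simp [pvGo, List.append_assoc]
    · rw [if_neg h, ih]
      have h' : ¬ l = "" := by simpa using h
      simp [pvGo, h']

theorem pvGoEq (lines : List String) :
    ∀ (cur : List (List Int)),
      pvGo cur lines =
        (if (none : Option (List Int)) ∈ lines.map pvRow then
          (cur ++ ((lines.map pvRow).take ((lines.map pvRow).idxOf none)).filterMap id) ::
            mgeneratorAltGo ((lines.map pvRow).drop ((lines.map pvRow).idxOf none + 1))
        else []) := by
  induction lines with
  | nil => intro cur; simp [pvGo]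
  | cons l rest ih =>
    intro cur
    by_cases h : l = ""
    · subst h
      have hrest : pvGo ([] : List (List Int)) rest = mgeneratorAltGo (rest.map pvRow) := by
        rw [ih]
        conv_rhs => rw [altGo_unfold]
        by_cases hm : (none : Option (List Int)) ∈ rest.map pvRow <;> simp [hm]
      simp [pvGo, pvRow, hrest]
    · rw [pvGo]
      simp only [if_neg h, ih]
      have hrow : pvRow l = some (pvParseLine l) := by simp [pvRow, h]
      by_cases hr : (none : Option (List Int)) ∈ rest.map pvRow
      · simp [hrow, hr, List.append_assoc]
      · simp [hrow, hr]

-- ===== VERDICT (by name: the statement is the Claim_ definition above) =====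
theorem mgenerator_spec : Claim_equal_mgenerator := by
  intro data _ _
  show mgenerator data = mgenerator_alt data
  rw [mgenerator, mgenerator_alt, pvFoldA, List.nil_append, pvGoEq]
  conv_rhs => rw [altGo_unfold]
  by_cases hm : "" ∈ data <;> simp [hm]
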